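-- pv_equiv track=rewrite | github.com/mahroonoohi/Bachelor-of-Computer-Engineering | BachelorTthesis/Algorithm_visualization/AVL/createion/main.py | generate_latex_document_steps
-- ===== SOURCE A (Python) =====
-- def generate_latex_document_steps(steps):
--     latex_code = r"""
-- \documentclass[10pt,a4paper]{article}
-- \usepackage[T1]{fontenc}
-- \usepackage{tikz}
-- \usepackage[margin=1cm]{geometry}
-- \begin{document}
-- \subsection*{Introduction}
-- The AVL tree is a self-balancing binary search tree where the difference in heights between the left and right subtrees of any node (known as the balance factor) is at most 1. When an imbalance occurs due to insertion or deletion, rotations are performed to restore balance.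
--
-- \subsection*{Step-by-Step Process}
-- \begin{itemize}
--     \item \textbf{Insertion}: Nodes are inserted following the binary search tree rules. After insertion, the height of each node is updated, and the balance factor is checked. If the balance factor of any node becomes greater than 1 or less than -1, rotations are performed to restore balance.
--     \item \textbf{Rotations}: Depending on the type of imbalance (left-heavy or right-heavy), one or more rotations are performed. The types of rotations include:
--     \begin{itemize}
--         \item \textbf{Right Rotation}: Applied when a left-heavy subtree needs balancing.
--         \item \textbf{Left Rotation}: Applied when a right-heavy subtree needs balancing.
--         \item \textbf{Left-Right Rotation}: Applied when a left subtree has a right-heavy child.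
--         \item \textbf{Right-Left Rotation}: Applied when a right subtree has a left-heavy child.
--     \end{itemize}
-- \end{itemize}
--
-- \subsection*{Steps Visualization}
-- The following figures illustrate the AVL tree at various stages of the insertion and balancing process:
--
-- """
--     for i in range(0, len(steps), 3):
--         latex_code += r"""
-- \begin{figure}[h!]
-- \centering
-- """
--         for j in range(i, min(i + 3, len(steps))):
--             latex_code += r"""
-- \begin{minipage}{0.8\textwidth}
--     \centering
--     \begin{tikzpicture}[level distance=15mm, sibling distance=20mm]
--         \tikzstyle{every node}=[circle,inner sep=1pt, minimum size=8mm]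
--         \tikzstyle{level 1}=[sibling distance=60mm]
--         \tikzstyle{level 2}=[sibling distance=30mm]
--         \tikzstyle{level 3}=[sibling distance=15mm]
--         \tikzstyle{level 4}=[sibling distance=10mm]
--         """ + steps[j] + ";" + r"""
--     \end{tikzpicture}
--     \caption{Step """ + str(j + 1) + r"""}
-- \end{minipage}
-- \vspace{1cm}
-- """
--
--         latex_code += r"""
-- \end{figure}
-- \newpage
-- """
--
--     latex_code += r"""
-- \end{document}
-- """
--     return latex_code
-- ===== SOURCE B (Python) =====
-- def generate_latex_document_steps(steps):
--     preamble = r"""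
-- \documentclass[10pt,a4paper]{article}
-- \usepackage[T1]{fontenc}
-- \usepackage{tikz}
-- \usepackage[margin=1cm]{geometry}
-- \begin{document}
-- \subsection*{Introduction}
-- The AVL tree is a self-balancing binary search tree where the difference in heights between the left and right subtrees of any node (known as the balance factor) is at most 1. When an imbalance occurs due to insertion or deletion, rotations are performed to restore balance.
--
-- \subsection*{Step-by-Step Process}
-- \begin{itemize}
--     \item \textbf{Insertion}: Nodes are inserted following the binary search tree rules. After insertion, the height of each node is updated, and the balance factor is checked. If the balance factor of any node becomes greater than 1 or less than -1, rotations are performed to restore balance.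
--     \item \textbf{Rotations}: Depending on the type of imbalance (left-heavy or right-heavy), one or more rotations are performed. The types of rotations include:
--     \begin{itemize}
--         \item \textbf{Right Rotation}: Applied when a left-heavy subtree needs balancing.
--         \item \textbf{Left Rotation}: Applied when a right-heavy subtree needs balancing.
--         \item \textbf{Left-Right Rotation}: Applied when a left subtree has a right-heavy child.
--         \item \textbf{Right-Left Rotation}: Applied when a right subtree has a left-heavy child.
--     \end{itemize}
-- \end{itemize}
--
-- \subsection*{Steps Visualization}
-- The following figures illustrate the AVL tree at various stages of the insertion and balancing process:
--
-- """
--     fig_open = r"""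
-- \begin{figure}[h!]
-- \centering
-- """
--     mini_pre = r"""
-- \begin{minipage}{0.8\textwidth}
--     \centering
--     \begin{tikzpicture}[level distance=15mm, sibling distance=20mm]
--         \tikzstyle{every node}=[circle,inner sep=1pt, minimum size=8mm]
--         \tikzstyle{level 1}=[sibling distance=60mm]
--         \tikzstyle{level 2}=[sibling distance=30mm]
--         \tikzstyle{level 3}=[sibling distance=15mm]
--         \tikzstyle{level 4}=[sibling distance=10mm]
--         """
--     mini_mid = r"""
--     \end{tikzpicture}
--     \caption{Step """
--     mini_post = r"""}
-- \end{minipage}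
-- \vspace{1cm}
-- """
--     fig_close = r"""
-- \end{figure}
-- \newpage
-- """
--     footer = r"""
-- \end{document}
-- """
--     parts = [preamble]
--     last = len(steps) - 1
--     for j, s in enumerate(steps):
--         if j % 3 == 0:
--             parts.append(fig_open)
--         parts.append(mini_pre + s + ";" + mini_mid + str(j + 1) + mini_post)
--         if j % 3 == 2 or j == last:
--             parts.append(fig_close)
--     parts.append(footer)
--     return "".join(parts)
-- ===== Notes on version B (the rewrite author's own statement) =====
-- stated objective: simpler
-- what changed: Replaced A's nested chunk-of-3 loops with repeated string concatenation by a single flat pass over enumerate(steps) that decides figure open/close per step via j % 3, collecting the literal blocks in a parts list joined once at the end.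
import Mathlib
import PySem

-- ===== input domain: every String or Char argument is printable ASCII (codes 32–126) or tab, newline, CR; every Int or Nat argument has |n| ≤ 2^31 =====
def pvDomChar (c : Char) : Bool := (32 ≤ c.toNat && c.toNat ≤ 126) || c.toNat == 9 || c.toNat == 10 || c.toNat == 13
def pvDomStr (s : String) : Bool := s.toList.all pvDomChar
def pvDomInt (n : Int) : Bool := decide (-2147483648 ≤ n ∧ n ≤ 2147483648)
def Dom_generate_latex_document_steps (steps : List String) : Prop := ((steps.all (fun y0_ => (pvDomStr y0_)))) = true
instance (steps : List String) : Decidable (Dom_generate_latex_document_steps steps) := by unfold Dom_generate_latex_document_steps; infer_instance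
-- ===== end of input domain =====

def pvPreamble : String := "\n\\documentclass[10pt,a4paper]{article}\n\\usepackage[T1]{fontenc}\n\\usepackage{tikz}\n\\usepackage[margin=1cm]{geometry}\n\\begin{document}\n\\subsection*{Introduction}\nThe AVL tree is a self-balancing binary search tree where the difference in heights between the left and right subtrees of any node (known as the balance factor) is at most 1. When an imbalance occurs due to insertion or deletion, rotations are performed to restore balance.\n\n\\subsection*{Step-by-Step Process}\n\\begin{itemize}\n    \\item \\textbf{Insertion}: Nodes are inserted following the binary search tree rules. After insertion, the height of each node is updated, and the balance factor is checked. If the balance factor of any node becomes greater than 1 or less than -1, rotations are performed to restore balance.\n    \\item \\textbf{Rotations}: Depending on the type of imbalance (left-heavy or right-heavy), one or more rotations are performed. The types of rotations include:\n    \\begin{itemize}\n        \\item \\textbf{Right Rotation}: Applied when a left-heavy subtree needs balancing.\n        \\item \\textbf{Left Rotation}: Applied when a right-heavy subtree needs balancing.\n        \\item \\textbf{Left-Right Rotation}: Applied when a left subtree has a right-heavy child.\n        \\item \\textbf{Right-Left Rotation}: Applied when a right subtree has a left-heavy child.\n    \\end{itemize}\n\\end{itemize}\n\n\\subsection*{Steps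 Visualization}\nThe following figures illustrate the AVL tree at various stages of the insertion and balancing process:\n\n"
def pvFigOpen : String := "\n\\begin{figure}[h!]\n\\centering\n"
def pvMiniPre : String := "\n\\begin{minipage}{0.8\\textwidth}\n    \\centering\n    \\begin{tikzpicture}[level distance=15mm, sibling distance=20mm]\n        \\tikzstyle{every node}=[circle,inner sep=1pt, minimum size=8mm]\n        \\tikzstyle{level 1}=[sibling distance=60mm]\n        \\tikzstyle{level 2}=[sibling distance=30mm]\n        \\tikzstyle{level 3}=[sibling distance=15mm]\n        \\tikzstyle{level 4}=[sibling distance=10mm]\n        "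
def pvMiniMid : String := "\n    \\end{tikzpicture}\n    \\caption{Step "
def pvMiniPost : String := "}\n\\end{minipage}\n\\vspace{1cm}\n"
def pvFigClose : String := "\n\\end{figure}\n\\newpage\n"
def pvFooter : String := "\n\\end{document}\n"

-- B replaces A's nested chunk-of-3 loops by one flat pass over enumerate(steps) collecting parts
-- (figure open/close decided by j % 3) joined at the end; objective: simpler decomposition, same output.

-- ===== PORT A =====
def generate_latex_document_steps (steps : List String) : String :=
  let n : Int := (steps.length : Int)
  let latex1 := (PySem.List.pyRange 0 n 3).foldl (fun acc i =>
      let accA := acc ++ pvFigOpen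
      let accB := (PySem.List.pyRange i (min (i + 3) n) 1).foldl
        (fun a j => a ++ pvMiniPre ++ PySem.List.pyGetD steps j "" ++ ";" ++ pvMiniMid
                      ++ PySem.Int.toStr (j + 1) ++ pvMiniPost) accA
      accB ++ pvFigClose) pvPreamble
  latex1 ++ pvFooter

-- ===== PORT B =====
def generate_latex_document_steps_alt (steps : List String) : String :=
  let last : Int := (steps.length : Int) - 1
  let parts := (PySem.List.enumerate steps).foldl (fun (parts : List String) (js : Int × String) =>
      let p1 := if PySem.Int.mod js.1 3 = 0 then parts ++ [pvFigOpen] else parts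
      let p2 := p1 ++ [pvMiniPre ++ js.2 ++ ";" ++ pvMiniMid ++ PySem.Int.toStr (js.1 + 1) ++ pvMiniPost]
      if PySem.Int.mod js.1 3 = 2 ∨ js.1 = last then p2 ++ [pvFigClose] else p2)
    [pvPreamble]
  PySem.Str.join "" (parts ++ [pvFooter])

-- ===== PRECONDITION & SPEC =====
def Spec_generate_latex_document_steps (steps : List String) (out : String) : Prop := out = generate_latex_document_steps_alt steps
instance (steps : List String) (out : String) : Decidable (Spec_generate_latex_document_steps steps out) := by unfold Spec_generate_latex_document_steps; infer_instance

-- ===== CLAIM (what is proved, stated in full; the proofs are below) =====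
def Claim_equal_generate_latex_document_steps : Prop := ∀ (steps : List String), Dom_generate_latex_document_steps steps → Spec_generate_latex_document_steps steps (generate_latex_document_steps steps)

-- ===== LEMMAS AND PROOFS =====

def pvPiece (steps : List String) (j : Int) : String :=
  pvMiniPre ++ PySem.List.pyGetD steps j "" ++ ";" ++ pvMiniMid ++ PySem.Int.toStr (j + 1) ++ pvMiniPost

def pvBstep (steps : List String) (acc : String) (j : Int) : String :=
  let a1 := if PySem.Int.mod j 3 = 0 then acc ++ pvFigOpen else acc
  let a2 := a1 ++ pvPiece steps j
  if PySem.Int.mod j 3 = 2 ∨ j = (steps.length : Int) - 1 then a2 ++ pvFigClose else a2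

lemma pvJoin_nil : PySem.Str.join "" [] = "" := by
  simp [PySem.Str.join, PySem.Chars.join, List.intercalate]

lemma pvJoin_cons (a : String) (l : List String) :
    PySem.Str.join "" (a :: l) = a ++ PySem.Str.join "" l := by
  cases l with
  | nil => simp [PySem.Str.join, PySem.Chars.join, List.intercalate]
  | cons b t =>
    simp [PySem.Str.join, PySem.Chars.join, List.intercalate]

lemma pvJoin_snoc (l : List String) (x : String) :
    PySem.Str.join "" (l ++ [x]) = PySem.Str.join "" l ++ x := by
  induction l with
  | nil => simp [pvJoin_nil, pvJoin_cons]
  | cons a t ih => simp [pvJoin_cons, ih, String.append_assoc]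

lemma pvR3_nil (i n : Int) (h : n ≤ i) : PySem.List.pyRange i n 3 = [] := by
  rw [PySem.List.pyRange_of_pos i n (by norm_num)]
  simp [show ¬ i < n by omega]

lemma pvR3_cons (i n : Int) (h : i < n) :
    PySem.List.pyRange i n 3 = i :: PySem.List.pyRange (i + 3) n 3 := by
  rw [PySem.List.pyRange_of_pos i n (by norm_num), PySem.List.pyRange_of_pos (i+3) n (by norm_num)]
  by_cases h3 : i + 3 < n
  · rw [if_pos h, if_pos h3]
    have ht : ((n - i + 3 - 1) / 3).toNat = ((n - (i+3) + 3 - 1) / 3).toNat + 1 := by omega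
    rw [ht, List.range_succ_eq_map]
    simp [Function.comp, mul_add]
    intro k hk; ring
  · rw [if_pos h, if_neg h3]
    have ht : ((n - i + 3 - 1) / 3).toNat = 1 := by omega
    simp [ht, List.range_one]
lemma pvJoin_append (l1 l2 : List String) :
    PySem.Str.join "" (l1 ++ l2) = PySem.Str.join "" l1 ++ PySem.Str.join "" l2 := by
  induction l1 with
  | nil => simp [pvJoin_nil]
  | cons a t ih => simp [pvJoin_cons, ih, String.append_assoc]

lemma pvBridge (steps : List String) (l : List Int) : ∀ (parts : List String),
    PySem.Str.join "" (l.foldl (fun (parts : List String) (j : Int) =>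
        let p1 := if PySem.Int.mod j 3 = 0 then parts ++ [pvFigOpen] else parts
        let p2 := p1 ++ [pvMiniPre ++ PySem.List.pyGetD steps j "" ++ ";" ++ pvMiniMid ++ PySem.Int.toStr (j + 1) ++ pvMiniPost]
        if PySem.Int.mod j 3 = 2 ∨ j = (steps.length : Int) - 1 then p2 ++ [pvFigClose] else p2) parts)
      = l.foldl (pvBstep steps) (PySem.Str.join "" parts) := by
  induction l with
  | nil => intro parts; rfl
  | cons j t ih =>
    intro parts
    simp only [List.foldl_cons]
    rw [ih]
    congr 1
    unfold pvBstep pvPiece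
    split_ifs <;> simp [pvJoin_append, pvJoin_cons, pvJoin_nil, String.append_assoc]

set_option maxHeartbeats 1000000 in
lemma pvMain (steps : List String) : ∀ (k : Nat) (i : Int) (acc : String),
    ((steps.length : Int) - i).toNat ≤ k → 0 ≤ i → i % 3 = 0 →
    (PySem.List.pyRange i (steps.length : Int) 3).foldl (fun acc i =>
        let accA := acc ++ pvFigOpen
        let accB := (PySem.List.pyRange i (min (i + 3) (steps.length : Int)) 1).foldl
          (fun a j => a ++ pvMiniPre ++ PySem.List.pyGetD steps j "" ++ ";" ++ pvMiniMid
                        ++ PySem.Int.toStr (j + 1) ++ pvMiniPost) accA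
        accB ++ pvFigClose) acc
      = (PySem.List.pyRange i (steps.length : Int) 1).foldl (pvBstep steps) acc := by
  intro k
  induction k with
  | zero =>
    intro i acc hk h0 hm
    rw [pvR3_nil _ _ (by omega), PySem.List.pyRange_one_eq_nil (by omega)]
    rfl
  | succ k ih =>
    intro i acc hk h0 hm
    by_cases hlt : i < (steps.length : Int)
    case neg =>
      rw [pvR3_nil _ _ (by omega), PySem.List.pyRange_one_eq_nil (by omega)]
      rfl
    case pos =>
      have d0 : (3 : Int) ∣ i := by omega
      have d1 : ¬ ((3 : Int) ∣ (i + 1)) := by omega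
      have d2 : ¬ ((3 : Int) ∣ (i + 2)) := by omega
      have e0 : ¬ (i % 3 = 2) := by omega
      have e1 : ¬ ((i + 1) % 3 = 2) := by omega
      have e2 : (i + 2) % 3 = 2 := by omega
      rw [pvR3_cons _ _ hlt]
      by_cases h3 : i + 3 ≤ (steps.length : Int)
      · have hmin : min (i + 3) (steps.length : Int) = i + 3 := by omega
        have hne0 : i ≠ (steps.length : Int) - 1 := by omega
        have hne1 : i + 1 ≠ (steps.length : Int) - 1 := by omega
        rw [show PySem.List.pyRange i (steps.length : Int) 1
              = i :: (i+1) :: (i+2) :: PySem.List.pyRange (i+3) (steps.length : Int) 1 by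
            rw [PySem.List.pyRange_one_cons (by omega), PySem.List.pyRange_one_cons (by omega),
                PySem.List.pyRange_one_cons (by omega)]; ring_nf]
        simp only [List.foldl_cons, hmin]
        rw [show PySem.List.pyRange i (i + 3) 1 = [i, i+1, i+2] by
            rw [PySem.List.pyRange_one_cons (by omega), PySem.List.pyRange_one_cons (by omega),
                PySem.List.pyRange_one_cons (by omega), PySem.List.pyRange_one_eq_nil (by omega)]; ring_nf]
        rw [ih (i + 3) _ (by omega) (by omega) (by omega)]
        refine congrArg (fun a => List.foldl (pvBstep steps) a (PySem.List.pyRange (i + 3) (steps.length : Int) 1)) ?_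
        unfold pvBstep pvPiece
        simp [d0, d1, e0, e1, e2, hne0, hne1, String.append_assoc]
      · by_cases h1 : (steps.length : Int) = i + 1
        · have hmin : min (i + 3) (steps.length : Int) = (steps.length : Int) := by omega
          have hI : (i = (steps.length : Int) - 1) = True := eq_true (by omega)
          rw [show PySem.List.pyRange i (steps.length : Int) 1 = [i] by
              rw [PySem.List.pyRange_one_cons (by omega), PySem.List.pyRange_one_eq_nil (by omega)]]
          simp only [List.foldl_cons, hmin]
          rw [show PySem.List.pyRange i (steps.length : Int) 1 = [i] by
              rw [PySem.List.pyRange_one_cons (by omega), PySem.List.pyRange_one_eq_nil (by omega)]]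
          rw [pvR3_nil _ _ (by omega)]
          unfold pvBstep pvPiece
          simp [d0, e0, hI, String.append_assoc]
        · have h2 : (steps.length : Int) = i + 2 := by omega
          have hmin : min (i + 3) (steps.length : Int) = (steps.length : Int) := by omega
          have hne0 : i ≠ (steps.length : Int) - 1 := by omega
          have hI1 : (i + 1 = (steps.length : Int) - 1) = True := eq_true (by omega)
          rw [show PySem.List.pyRange i (steps.length : Int) 1 = [i, i+1] by
              rw [PySem.List.pyRange_one_cons (by omega), PySem.List.pyRange_one_cons (by omega),
                  PySem.List.pyRange_one_eq_nil (by omega)]]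
          simp only [List.foldl_cons, hmin]
          rw [show PySem.List.pyRange i (steps.length : Int) 1 = [i, i+1] by
              rw [PySem.List.pyRange_one_cons (by omega), PySem.List.pyRange_one_cons (by omega),
                  PySem.List.pyRange_one_eq_nil (by omega)]]
          rw [pvR3_nil _ _ (by omega)]
          unfold pvBstep pvPiece
          simp [d0, d1, e0, e1, hne0, hI1, String.append_assoc]

-- ===== VERDICT (by name: the statement is the Claim_ definition above) =====
theorem generate_latex_document_steps_spec : Claim_equal_generate_latex_document_steps := by
  unfold Claim_equal_generate_latex_document_steps Spec_generate_latex_document_steps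
  intro steps _d
  unfold generate_latex_document_steps generate_latex_document_steps_alt
  dsimp only
  rw [PySem.List.enumerate_eq_map_pyRange steps ""]
  rw [List.foldl_map]
  rw [pvJoin_snoc]
  rw [pvBridge]
  rw [pvJoin_cons, pvJoin_nil]
  rw [pvMain steps ((steps.length : Int) - 0).toNat 0 _ (by omega) (by omega) (by omega)]
  simp [PySem.List.len]
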